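-- pv_equiv track=rewrite | github.com/goldcoderZ/pytorch | torch/distributed/_tensor/ops/math_ops.py | _infer_reduce_dims_map
-- ===== SOURCE A (Python) =====
-- from typing import cast, List, Optional, Sequence, Tuple, Union
--
-- def _infer_reduce_dims_map(
--     reduction_dims: List[int], input_ndim: int, keep_dim=False
-- ) -> List[int]:
--     reduction_dims_map = []
--     new_dim_count = 0
--     for input_dim in range(input_ndim):
--         if input_dim in reduction_dims and not keep_dim:
--             # if input dim in reduction dims, mark it as -1
--             reduction_dims_map.append(-1)
--         else:
--             # otherwise mark it as the new dim
--             reduction_dims_map.append(new_dim_count)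
--             new_dim_count += 1
--
--     return reduction_dims_map
-- ===== SOURCE B (Python) =====
-- def _infer_reduce_dims_map(
--     reduction_dims, input_ndim, keep_dim=False
-- ):
--     # set-index then scatter: build kept-dim list once, write new indices into a -1-filled map
--     reduced = set() if keep_dim else set(reduction_dims)
--     kept = [d for d in range(input_ndim) if d not in reduced]
--     result = [-1] * input_ndim
--     for new_idx, old_dim in enumerate(kept):
--         result[old_dim] = new_idx
--     return result
-- ===== Notes on version B (the rewrite author's own statement) =====
-- stated objective: faster
-- what changed: Replaces the single accumulate-while-scanning pass (with a list-membership test per dimension) by a two-pass build-index-then-scatter: build a set of reduced dims once, list the kept dims, then scatter their new indices into a [-1]-filled map.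
import Mathlib
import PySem

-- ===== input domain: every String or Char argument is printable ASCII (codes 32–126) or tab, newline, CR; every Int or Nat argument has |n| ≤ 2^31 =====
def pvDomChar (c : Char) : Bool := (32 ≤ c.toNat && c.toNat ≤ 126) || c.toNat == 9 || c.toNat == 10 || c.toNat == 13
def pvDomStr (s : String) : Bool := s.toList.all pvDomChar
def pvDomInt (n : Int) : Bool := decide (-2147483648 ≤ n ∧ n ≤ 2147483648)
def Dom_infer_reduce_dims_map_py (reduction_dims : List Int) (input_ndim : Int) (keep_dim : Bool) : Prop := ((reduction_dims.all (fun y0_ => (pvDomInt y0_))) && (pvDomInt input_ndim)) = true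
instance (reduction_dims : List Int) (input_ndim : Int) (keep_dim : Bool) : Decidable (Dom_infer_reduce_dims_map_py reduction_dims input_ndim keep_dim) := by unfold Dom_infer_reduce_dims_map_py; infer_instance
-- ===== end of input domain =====

-- B builds the kept-dimension list once from a set and scatters new indices into a [-1]-filled map
-- (two-pass index-then-scatter instead of A's accumulate-while-scanning single pass; one set build replaces a list scan per dim).

-- ===== PORT A =====
def infer_reduce_dims_map_py (reduction_dims : List Int) (input_ndim : Int) (keep_dim : Bool) : List Int :=
  ((PySem.List.pyRange 0 input_ndim 1).foldl
    (fun (st : List Int × Int) input_dim =>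
      if reduction_dims.contains input_dim && !keep_dim then
        (st.1 ++ [-1], st.2)          -- mark reduced dim as -1
      else
        (st.1 ++ [st.2], st.2 + 1))   -- otherwise mark it as the new dim
    ([], 0)).1

-- ===== PORT B =====
-- reduced = set() if keep_dim else set(reduction_dims); kept = [d for d in range(n) if d not in reduced];
-- result = [-1]*n; for new_idx, old_dim in enumerate(kept): result[old_dim] = new_idx
-- (result[old_dim] = … : old_dim is always a valid index, 0 ≤ old_dim < input_ndim, so pySetD is exact here)
def infer_reduce_dims_map_py_alt (reduction_dims : List Int) (input_ndim : Int) (keep_dim : Bool) : List Int :=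
  (PySem.List.enumerate
      ((PySem.List.pyRange 0 input_ndim 1).filter
        (fun d => !(PySem.Set.contains (if keep_dim then PySem.Set.empty else PySem.Set.ofList reduction_dims) d)))
      0).foldl
    (fun res p => PySem.List.pySetD res p.2 p.1)
    (PySem.List.pyRepeat [-1] input_ndim)

-- ===== PRECONDITION & SPEC =====
def Spec_infer_reduce_dims_map_py (reduction_dims : List Int) (input_ndim : Int) (keep_dim : Bool) (out : List Int) : Prop := out = infer_reduce_dims_map_py_alt reduction_dims input_ndim keep_dim
instance (reduction_dims : List Int) (input_ndim : Int) (keep_dim : Bool) (out : List Int) : Decidable (Spec_infer_reduce_dims_map_py reduction_dims input_ndim keep_dim out) := by unfold Spec_infer_reduce_dims_map_py; infer_instance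

-- ===== CLAIM (what is proved, stated in full; the proofs are below) =====
def Claim_equal_infer_reduce_dims_map_py : Prop := ∀ (reduction_dims : List Int) (input_ndim : Int) (keep_dim : Bool), Dom_infer_reduce_dims_map_py reduction_dims input_ndim keep_dim → Spec_infer_reduce_dims_map_py reduction_dims input_ndim keep_dim (infer_reduce_dims_map_py reduction_dims input_ndim keep_dim)

-- ===== LEMMAS AND PROOFS =====

-- A's running counter equals the number of kept dims seen so far.
theorem pv_foldA_snd (c : Int → Bool) :
    ∀ (l : List Int) (acc : List Int) (k : Int),
      (l.foldl (fun (st : List Int × Int) d =>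
        if c d then (st.1 ++ [-1], st.2) else (st.1 ++ [st.2], st.2 + 1)) (acc, k)).2
        = k + ((l.filter (fun d => !c d)).length : Int) := by
  intro l
  induction l with
  | nil => intro acc k; simp
  | cons d t ih =>
    intro acc k
    by_cases hd : c d = true <;> simp [List.foldl_cons, hd, ih] <;> omega

-- Scattering at in-range positions of `base` never touches an appended tail.
theorem pv_scatter_append (kept : List Int) (s : Int) (base extra : List Int)
    (h : ∀ x ∈ kept, 0 ≤ x ∧ x < (base.length : Int)) :
    (PySem.List.enumerate kept s).foldl (fun res p => PySem.List.pySetD res p.2 p.1) (base ++ extra)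
      = ((PySem.List.enumerate kept s).foldl (fun res p => PySem.List.pySetD res p.2 p.1) base) ++ extra := by
  induction kept generalizing s base with
  | nil => simp [PySem.List.enumerate_nil]
  | cons k0 t ih =>
    obtain ⟨h0, hlt⟩ := h k0 (by simp)
    have hnat : k0.toNat < base.length := by omega
    rw [PySem.List.enumerate_cons]
    simp only [List.foldl_cons]
    rw [PySem.List.pySetD_of_nonneg _ _ h0, PySem.List.pySetD_of_nonneg _ _ h0,
        List.set_append_left _ _ hnat]
    rw [ih (s + 1) (base.set k0.toNat s)
        (fun x hx => by simpa using h x (List.mem_cons_of_mem _ hx))]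

-- Scattering preserves the length of the map.
theorem pv_scatter_length (kept : List Int) (s : Int) (base : List Int) :
    ((PySem.List.enumerate kept s).foldl (fun res p => PySem.List.pySetD res p.2 p.1) base).length
      = base.length := by
  induction kept generalizing s base with
  | nil => simp [PySem.List.enumerate_nil]
  | cons k0 t ih =>
    rw [PySem.List.enumerate_cons]
    simp only [List.foldl_cons]
    rw [ih, PySem.List.length_pySetD]

-- B's filtering condition coincides with A's branch condition.
theorem pv_pred_eq (reduction_dims : List Int) (keep_dim : Bool) :
    (fun d => !(PySem.Set.contains (if keep_dim then PySem.Set.empty else PySem.Set.ofList reduction_dims) d))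
      = fun d => !(reduction_dims.contains d && !keep_dim) := by
  funext d
  cases keep_dim <;>
    simp [PySem.Set.contains, PySem.Set.empty, PySem.Set.mem_ofList]

-- Setting the freshly appended slot overwrites exactly the -1 placeholder.
theorem pv_set_last (L : List Int) (v : Int) (m : Nat) (hL : L.length = m) :
    (L ++ [-1]).set m v = L ++ [v] := by
  rw [← hL, List.set_append_right _ _ (le_refl _)]; simp

-- The two ports agree at every nonnegative ndim.
theorem pv_main_nat (reduction_dims : List Int) (keep_dim : Bool) :
    ∀ m : Nat, infer_reduce_dims_map_py reduction_dims (m : Int) keep_dim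
      = infer_reduce_dims_map_py_alt reduction_dims (m : Int) keep_dim := by
  intro m
  induction m with
  | zero =>
    unfold infer_reduce_dims_map_py infer_reduce_dims_map_py_alt
    rw [Nat.cast_zero, PySem.List.pyRange_one_eq_nil (le_refl 0)]
    simp [PySem.List.enumerate_nil, PySem.List.pyRepeat_singleton]
  | succ m ih =>
    unfold infer_reduce_dims_map_py infer_reduce_dims_map_py_alt at *
    rw [pv_pred_eq] at *
    have hcast : ((m + 1 : Nat) : Int) = (m : Int) + 1 := by push_cast; ring
    have hrange : PySem.List.pyRange 0 ((m + 1 : Nat) : Int) 1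
        = PySem.List.pyRange 0 (m : Int) 1 ++ [(m : Int)] := by
      rw [hcast]; exact PySem.List.pyRange_one_succ_right (by positivity)
    have hrep : PySem.List.pyRepeat [(-1 : Int)] ((m + 1 : Nat) : Int)
        = PySem.List.pyRepeat [(-1 : Int)] (m : Int) ++ [-1] := by
      simp only [PySem.List.pyRepeat_singleton]
      rw [show (((m + 1 : Nat) : Int)).toNat = (m : Int).toNat + 1 from by omega, List.replicate_succ']
    have hmem : ∀ x ∈ (PySem.List.pyRange 0 (m : Int) 1).filter (fun d => !(reduction_dims.contains d && !keep_dim)),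
        0 ≤ x ∧ x < ((PySem.List.pyRepeat [(-1 : Int)] (m : Int)).length : Int) := by
      intro x hx
      have := (PySem.List.mem_pyRange_one).1 (List.mem_of_mem_filter hx)
      simp only [PySem.List.pyRepeat_singleton, List.length_replicate]
      omega
    rw [hrange, hrep, List.filter_append, List.foldl_append]
    simp only [List.filter_cons, List.filter_nil]
    by_cases hm : (reduction_dims.contains (m : Int) && !keep_dim) = true
    · -- reduced dim: kept unchanged, A appends -1, the tail [-1] of the map stays untouched
      simp only [List.foldl_cons, List.foldl_nil, hm, if_true, Bool.not_true, Bool.false_eq_true, if_false,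
        List.append_nil]
      rw [pv_scatter_append _ _ _ _ hmem, ← ih]
    · -- kept dim: A appends its counter; B writes kept-count at position m
      have hf : (reduction_dims.contains (m : Int) && !keep_dim) = false := by simpa using hm
      simp only [List.foldl_cons, List.foldl_nil, hf, Bool.not_false, Bool.false_eq_true,
        if_false, if_true]
      rw [PySem.List.enumerate_append, List.foldl_append, pv_scatter_append _ _ _ _ hmem]
      have hlen : ((PySem.List.enumerate ((PySem.List.pyRange 0 (m : Int) 1).filter (fun d => !(reduction_dims.contains d && !keep_dim))) 0).foldl
          (fun res p => PySem.List.pySetD res p.2 p.1) (PySem.List.pyRepeat [(-1 : Int)] (m : Int))).length = m := by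
        rw [pv_scatter_length]; simp [PySem.List.pyRepeat_singleton]
      rw [PySem.List.enumerate_cons, PySem.List.enumerate_nil]
      simp only [List.foldl_cons, List.foldl_nil]
      rw [PySem.List.pySetD_of_nonneg _ _ (by positivity)]
      rw [show ((m : Int)).toNat = m from by omega]
      rw [pv_set_last _ _ _ hlen]
      rw [← ih, pv_foldA_snd]

-- ===== VERDICT (by name: the statement is the Claim_ definition above) =====
theorem infer_reduce_dims_map_py_spec : Claim_equal_infer_reduce_dims_map_py := by
  intro reduction_dims input_ndim keep_dim _
  unfold Spec_infer_reduce_dims_map_py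
  by_cases h : 0 ≤ input_ndim
  · rw [show input_ndim = ((input_ndim.toNat : Nat) : Int) from by omega]
    exact pv_main_nat reduction_dims keep_dim input_ndim.toNat
  · -- negative ndim: range is empty and the map is empty on both sides
    have hle : input_ndim ≤ 0 := by omega
    have ht : input_ndim.toNat = 0 := by omega
    unfold infer_reduce_dims_map_py infer_reduce_dims_map_py_alt
    rw [PySem.List.pyRange_one_eq_nil hle]
    simp [PySem.List.enumerate_nil, PySem.List.pyRepeat_singleton, ht]
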